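-- pv_equiv track=rewrite | github.com/pypi-data/pypi-mirror-358 | packages/mlx-textgen/mlx_textgen-0.2.1.tar.gz/mlx_textgen-0.2.1/src/mlx_textgen/cache_utils.py | split_list_by_image_token
-- ===== SOURCE A (Python) =====
-- from typing import List, Optional, Dict, Union, Tuple, Literal, Callable, TYPE_CHECKING
--
-- def split_list_by_image_token(data_list: List[int], image_token_id: Union[int, List[int]]) -> Tuple[List[List[int]], List[List[int]]]:
--     result = []
--     images = []
--     current_sublist = []
--     img_sublist = []
--     token_set = [image_token_id] if isinstance(image_token_id, int) else image_token_id
--     for i in data_list: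
--         if i not in token_set:
--             current_sublist.append(i)
--             if img_sublist:
--                 images.append(img_sublist)
--                 img_sublist = []
--         else:
--             img_sublist.append(i)
--             if current_sublist:
--                 result.append(current_sublist)
--                 current_sublist = []
--     result.append(current_sublist)
--     if img_sublist:
--         images.append(img_sublist)
--     return result, images
-- ===== SOURCE B (Python) =====
-- def split_list_by_image_token(data_list, image_token_id):
--     token_set = [image_token_id] if isinstance(image_token_id, int) else image_token_id
--     # one pass building consecutive runs tagged with "is a token run", then partition
--     runs = []
--     for x in data_list:
--         k = x in token_set
--         if runs and runs[-1][0] == k: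
--             runs[-1][1].append(x)
--         else:
--             runs.append((k, [x]))
--     result = [run for k, run in runs if not k]
--     images = [run for k, run in runs if k]
--     if not data_list or data_list[-1] in token_set:
--         result.append([])
--     return result, images
-- ===== Notes on version B (the rewrite author's own statement) =====
-- stated objective: simpler
-- what changed: Replaces A's four interleaved accumulators with flush-on-switch logic by one pass that builds tagged consecutive runs, then partitions the runs into non-token and token groups and appends the trailing empty sublist by A's rule (empty input or last element is a token).
import Mathlib
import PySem

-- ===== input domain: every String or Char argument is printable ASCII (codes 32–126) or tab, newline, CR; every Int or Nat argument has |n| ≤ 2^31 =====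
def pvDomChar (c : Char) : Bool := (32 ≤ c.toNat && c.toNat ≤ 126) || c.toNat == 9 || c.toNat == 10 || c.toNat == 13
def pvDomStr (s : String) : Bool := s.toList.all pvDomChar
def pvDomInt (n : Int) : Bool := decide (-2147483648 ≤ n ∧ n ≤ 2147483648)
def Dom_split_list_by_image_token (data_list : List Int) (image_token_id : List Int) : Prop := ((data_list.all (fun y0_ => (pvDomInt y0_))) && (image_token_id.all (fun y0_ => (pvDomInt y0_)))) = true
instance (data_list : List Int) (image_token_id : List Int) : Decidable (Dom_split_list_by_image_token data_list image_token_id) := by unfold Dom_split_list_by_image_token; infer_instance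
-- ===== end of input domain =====

-- B replaces A's two interleaved accumulators-with-flush by a single pass building
-- tagged consecutive runs, partitioned afterwards (objective: simpler decomposition).

-- ===== PORT A =====
-- loop body of A's `for i in data_list`
def pvStepA (token_set : List Int)
    (st : List (List Int) × List (List Int) × List Int × List Int) (i : Int) :
    List (List Int) × List (List Int) × List Int × List Int :=
  let (result, images, current_sublist, img_sublist) := st
  if i ∉ token_set then
    let current_sublist := current_sublist ++ [i]
    if img_sublist ≠ [] then (result, images ++ [img_sublist], current_sublist, [])
    else (result, images, current_sublist, img_sublist)
  else
    let img_sublist := img_sublist ++ [i]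
    if current_sublist ≠ [] then (result ++ [current_sublist], images, [], img_sublist)
    else (result, images, current_sublist, img_sublist)

def split_list_by_image_token (data_list : List Int) (image_token_id : List Int) :
    List (List Int) × List (List Int) :=
  -- with a list argument, Python's `token_set` is `image_token_id` itself
  let token_set := image_token_id
  let st := data_list.foldl (pvStepA token_set) ([], [], [], [])
  let (result, images, _current_sublist, img_sublist) := st
  (result ++ [_current_sublist], if img_sublist ≠ [] then images ++ [img_sublist] else images)

-- ===== PORT B =====
-- loop body of B's run builder: append to the last run if its tag matches, else start a new run
def pvRunsStep (token_set : List Int) (runs : List (Bool × List Int)) (x : Int) :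
    List (Bool × List Int) :=
  let k := decide (x ∈ token_set)
  match runs.getLast? with
  | some p => if p.1 = k then runs.dropLast ++ [(k, p.2 ++ [x])] else runs ++ [(k, [x])]
  | none => runs ++ [(k, [x])]

def pvRes (runs : List (Bool × List Int)) : List (List Int) :=
  (runs.filter (fun g => !g.1)).map Prod.snd

def pvIms (runs : List (Bool × List Int)) : List (List Int) :=
  (runs.filter (fun g => g.1)).map Prod.snd

def split_list_by_image_token_alt (data_list : List Int) (image_token_id : List Int) :
    List (List Int) × List (List Int) :=
  let runs := data_list.foldl (pvRunsStep image_token_id) []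
  let result := pvRes runs
  let images := pvIms runs
  -- `not data_list or data_list[-1] in token_set`; Option.all is true on none
  let result := if data_list.getLast?.all (fun l => decide (l ∈ image_token_id)) then result ++ [[]] else result
  (result, images)

-- ===== PRECONDITION & SPEC =====
def Spec_split_list_by_image_token (data_list : List Int) (image_token_id : List Int) (out : List (List Int) × List (List Int)) : Prop := out = split_list_by_image_token_alt data_list image_token_id
instance (data_list : List Int) (image_token_id : List Int) (out : List (List Int) × List (List Int)) : Decidable (Spec_split_list_by_image_token data_list image_token_id out) := by unfold Spec_split_list_by_image_token; infer_instance

-- ===== CLAIM (what is proved, stated in full; the proofs are below) =====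
def Claim_equal_split_list_by_image_token : Prop := ∀ (data_list : List Int) (image_token_id : List Int), Dom_split_list_by_image_token data_list image_token_id → Spec_split_list_by_image_token data_list image_token_id (split_list_by_image_token data_list image_token_id)

-- ===== LEMMAS AND PROOFS =====

-- Invariant relating A's four accumulators to B's run list: all runs but the last are
-- already flushed into result/images; the last run is the pending sublist of its kind.
def pvRel (st : List (List Int) × List (List Int) × List Int × List Int)
    (runs : List (Bool × List Int)) : Prop :=
  match runs.getLast? with
  | none => st = ([], [], [], [])
  | some (true, g) => g ≠ [] ∧ st = (pvRes runs.dropLast, pvIms runs.dropLast, [], g)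
  | some (false, g) => g ≠ [] ∧ st = (pvRes runs.dropLast, pvIms runs.dropLast, g, [])

theorem pvRes_concat (rs : List (Bool × List Int)) (k : Bool) (g : List Int) :
    pvRes (rs ++ [(k, g)]) = if k then pvRes rs else pvRes rs ++ [g] := by
  simp [pvRes, List.filter_append]
  cases k <;> simp

theorem pvIms_concat (rs : List (Bool × List Int)) (k : Bool) (g : List Int) :
    pvIms (rs ++ [(k, g)]) = if k then pvIms rs ++ [g] else pvIms rs := by
  simp [pvIms, List.filter_append]
  cases k <;> simp

theorem pvRel_step (ts : List Int)
    (st : List (List Int) × List (List Int) × List Int × List Int)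
    (rs : List (Bool × List Int)) (x : Int) (h : pvRel st rs) :
    pvRel (pvStepA ts st x) (pvRunsStep ts rs x) := by
  rcases hL : rs.getLast? with _ | ⟨k, g⟩
  · -- rs = []
    have hrs : rs = [] := List.getLast?_eq_none_iff.1 hL
    subst hrs
    simp [pvRel] at h
    subst h
    by_cases hx : x ∈ ts <;>
      simp [pvStepA, pvRunsStep, hx, pvRel, pvRes, pvIms]
  · -- rs = ys ++ [(k,g)]
    obtain ⟨ys, rfl⟩ := List.getLast?_eq_some_iff.1 hL
    have hdrop : (ys ++ [(k, g)]).dropLast = ys := by simp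
    cases k
    · -- pending non-token run g
      simp [pvRel, hdrop] at h
      obtain ⟨hg, hst⟩ := h
      subst hst
      by_cases hx : x ∈ ts
      · -- token: A flushes g into result, starts img run [x]; B starts run (true,[x])
        simp [pvStepA, pvRunsStep, hx, hg, pvRel, pvRes_concat, pvIms_concat]
      · -- not a token: both extend the pending run
        simp [pvStepA, pvRunsStep, hx, pvRel, hdrop, hg]
    · -- pending token run g
      simp [pvRel, hdrop] at h
      obtain ⟨hg, hst⟩ := h
      subst hst
      by_cases hx : x ∈ ts
      · simp [pvStepA, pvRunsStep, hx, pvRel, hdrop, hg]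
      · simp [pvStepA, pvRunsStep, hx, hg, pvRel, pvRes_concat, pvIms_concat]

theorem pvRel_foldl (ts : List Int) (xs : List Int)
    (st : List (List Int) × List (List Int) × List Int × List Int)
    (rs : List (Bool × List Int)) (h : pvRel st rs) :
    pvRel (xs.foldl (pvStepA ts) st) (xs.foldl (pvRunsStep ts) rs) := by
  induction xs generalizing st rs with
  | nil => exact h
  | cons x xs ih => exact ih _ _ (pvRel_step ts st rs x h)

-- after one B step the last run's tag is the tag of the element just processed
theorem pvRunsStep_lastKey (ts : List Int) (rs : List (Bool × List Int)) (x : Int) :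
    ∃ g, (pvRunsStep ts rs x).getLast? = some (decide (x ∈ ts), g) := by
  unfold pvRunsStep
  rcases rs.getLast? with _ | p
  · exact ⟨[x], by simp⟩
  · by_cases hp : p.1 = decide (x ∈ ts) <;> simp [hp]

theorem pvRuns_lastKey (ts : List Int) (xs : List Int) (x : Int) (l : Int)
    (rs : List (Bool × List Int)) (hl : (x :: xs).getLast? = some l) :
    ∃ g, ((x :: xs).foldl (pvRunsStep ts) rs).getLast? = some (decide (l ∈ ts), g) := by
  induction xs generalizing x rs with
  | nil =>
    simp at hl
    subst hl
    exact pvRunsStep_lastKey ts rs x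
  | cons y ys ih =>
    have hl' : (y :: ys).getLast? = some l := by
      simpa [List.getLast?_cons_cons] using hl
    simpa using ih y (pvRunsStep ts rs x) hl'

-- ===== VERDICT (by name: the statement is the Claim_ definition above) =====
theorem split_list_by_image_token_spec : Claim_equal_split_list_by_image_token := by
  intro data_list ts _
  unfold Spec_split_list_by_image_token
  cases data_list with
  | nil => simp [split_list_by_image_token, split_list_by_image_token_alt, pvRes, pvIms]
  | cons x xs =>
    have hrel : pvRel ((x :: xs).foldl (pvStepA ts) ([], [], [], []))
        ((x :: xs).foldl (pvRunsStep ts) []) :=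
      pvRel_foldl ts (x :: xs) _ _ (by simp [pvRel])
    obtain ⟨l, hl⟩ : ∃ l, (x :: xs).getLast? = some l :=
      Option.ne_none_iff_exists'.1 (by simp [List.getLast?_eq_none_iff])
    obtain ⟨g, hg⟩ := pvRuns_lastKey ts xs x l [] hl
    set rs := (x :: xs).foldl (pvRunsStep ts) [] with hrs
    obtain ⟨ys, hys⟩ := List.getLast?_eq_some_iff.1 hg
    by_cases hmem : l ∈ ts
    · simp [pvRel, hg, hmem] at hrel
      obtain ⟨hgne, hst⟩ := hrel
      simp [split_list_by_image_token, split_list_by_image_token_alt, ← hrs, hst, hgne,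
        hl, hmem, hys, pvRes_concat, pvIms_concat]
    · simp [pvRel, hg, hmem] at hrel
      obtain ⟨hgne, hst⟩ := hrel
      simp [split_list_by_image_token, split_list_by_image_token_alt, ← hrs, hst,
        hl, hmem, hys, pvRes_concat, pvIms_concat]
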